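-- pv_equiv track=rewrite | github.com/Ycreak/Latin_scansion_with_neural_networks | texts/prose/clean_prose.py | clean_prose_text
-- ===== SOURCE A (Python) =====
-- def clean_prose_text(text, remove_punctuation=True):
--     # Strip the text of non alphanumerical characters, lower it and merge whitespaces
--     if remove_punctuation:
--         text = text.translate({ord(c): None for c in "*,.:?![]';()~<>"})
--     else:
--         text = text.translate({ord(c): None for c in "*[]()~<>"})
--
--     text = text.translate({ord(c): None for c in '"'})
--     text = text.translate({ord(c): None for c in '0123456789'})
--
--     # Delete everything that is completely uppercase. Usually titles.
--     text = text.split()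
--     text = [item for item in text if not item.isupper()]
--     text = [word.lower() for word in text]
--
--     text = ' '.join(text)
--     return text
-- ===== SOURCE B (Python) =====
-- def clean_prose_text(text, remove_punctuation=True):
--     # Single character-level state machine: scan the text once, char by char,
--     # maintaining the current word buffer (already lowercased) and two flags
--     # (seen a cased char / seen a lowercase char); flush at whitespace.
--     removed = set("*,.:?![]';()~<>" if remove_punctuation else "*[]()~<>") | set('"0123456789')
--     pieces = []
--     buf = []
--     has_lower = False
--     has_cased = False
--     for c in text + ' ':          # sentinel space flushes the last word
--         if c.isspace():
--             if buf and not (has_cased and not has_lower):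
--                 pieces.append(''.join(buf))
--             buf = []
--             has_lower = False
--             has_cased = False
--         elif c not in removed:
--             if c.islower():
--                 has_lower = True
--             if c.islower() or c.isupper():
--                 has_cased = True
--             buf.append(c.lower())
--     return ' '.join(pieces)
-- ===== Notes on version B (the rewrite author's own statement) =====
-- stated objective: alternative
-- what changed: B is a single character-level state machine that scans the text once, building each cleaned lowercased word in a buffer with two flags (seen-cased/seen-lowercase) and flushing at whitespace, instead of A's three whole-string translate passes, split, and two list comprehensions; no split(), translate() or intermediate token lists are used.
import Mathlib
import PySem

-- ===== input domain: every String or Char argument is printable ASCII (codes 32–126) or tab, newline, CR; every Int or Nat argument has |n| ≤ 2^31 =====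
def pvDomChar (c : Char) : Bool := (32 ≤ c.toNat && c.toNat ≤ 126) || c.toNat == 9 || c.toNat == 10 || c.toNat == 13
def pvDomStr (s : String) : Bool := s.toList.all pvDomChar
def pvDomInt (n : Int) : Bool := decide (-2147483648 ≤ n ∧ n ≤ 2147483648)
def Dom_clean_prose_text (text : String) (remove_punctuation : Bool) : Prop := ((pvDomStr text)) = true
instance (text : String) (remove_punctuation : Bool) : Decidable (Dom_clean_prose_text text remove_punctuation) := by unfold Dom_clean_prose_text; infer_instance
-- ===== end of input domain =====

-- B replaces A's staged whole-string passes (three translates, split, two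
-- comprehensions) with ONE character-level state machine scanning the text once
-- (objective: alternative; same return value).

-- Python str.isupper() — at least one cased char and no lowercase one;
-- hand-ported, exact on the printable-ASCII domain (cased = 'a'..'z','A'..'Z').
def pvIsUpperTok (w : List Char) : Bool :=
  w.any PySem.Chars.isupper && !(w.any PySem.Chars.islower)

-- ===== PORT A =====
def clean_prose_text (text : String) (remove_punctuation : Bool) : String :=
  -- str.translate({ord(c): None for c in S}) deletes the chars of S: ported as a filter
  let l0 := text.toList
  let l1 := if remove_punctuation then
              l0.filter (fun c => !("*,.:?![]';()~<>".toList.contains c))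
            else
              l0.filter (fun c => !("*[]()~<>".toList.contains c))
  let l2 := l1.filter (fun c => !("\"".toList.contains c))
  let l3 := l2.filter (fun c => !("0123456789".toList.contains c))
  let ws := PySem.Chars.split₀ l3
  let ws1 := ws.filter (fun w => !(pvIsUpperTok w))
  let ws2 := ws1.map PySem.Chars.lower
  String.mk (PySem.Chars.join [' '] ws2)

-- ===== PORT B =====
-- the merged removal set (membership tests only, so a list of its elements)
def pvRemoved (remove_punctuation : Bool) : List Char :=
  (if remove_punctuation then "*,.:?![]';()~<>" else "*[]()~<>").toList
    ++ "\"0123456789".toList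

-- one state-machine step: state = (finished words, current word buffer (lowered),
-- seen-lowercase flag, seen-cased flag)
def pvStep (keep : Char → Bool)
    (st : List (List Char) × List Char × Bool × Bool) (c : Char) :
    List (List Char) × List Char × Bool × Bool :=
  match st with
  | (pieces, buf, hl, hc) =>
    if PySem.Chars.isspace c then
      ((if !buf.isEmpty && !(hc && !hl) then pieces ++ [buf] else pieces), [], false, false)
    else if keep c then
      (pieces, buf ++ [PySem.Chars.lowerChar c],
       hl || PySem.Chars.islower c,
       hc || (PySem.Chars.islower c || PySem.Chars.isupper c))
    else (pieces, buf, hl, hc)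

def clean_prose_text_alt (text : String) (remove_punctuation : Bool) : String :=
  let keep := fun c => !((pvRemoved remove_punctuation).contains c)
  -- 'for c in text + " "': the sentinel space flushes the last word
  let final := (text.toList ++ [' ']).foldl (pvStep keep) ([], [], false, false)
  String.mk (PySem.Chars.join [' '] final.1)

-- ===== PRECONDITION & SPEC =====
def Spec_clean_prose_text (text : String) (remove_punctuation : Bool) (out : String) : Prop := out = clean_prose_text_alt text remove_punctuation
instance (text : String) (remove_punctuation : Bool) (out : String) : Decidable (Spec_clean_prose_text text remove_punctuation out) := by unfold Spec_clean_prose_text; infer_instance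

-- ===== CLAIM (what is proved, stated in full; the proofs are below) =====
def Claim_equal_clean_prose_text : Prop := ∀ (text : String) (remove_punctuation : Bool), Dom_clean_prose_text text remove_punctuation → Spec_clean_prose_text text remove_punctuation (clean_prose_text text remove_punctuation)

-- ===== LEMMAS AND PROOFS =====

-- one token's contribution to the output under A's pipeline
def pvEmit (keep : Char → Bool) (t : List Char) : Option (List Char) :=
  let w := t.filter keep
  if !w.isEmpty && !(pvIsUpperTok w) then some (PySem.Chars.lower w) else none

theorem pv_lower_eq (w : List Char) :
    PySem.Chars.lower w = w.map PySem.Chars.lowerChar := rfl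

theorem pv_any_or (w : List Char) :
    w.any (fun c => PySem.Chars.islower c || PySem.Chars.isupper c)
      = (w.any PySem.Chars.islower || w.any PySem.Chars.isupper) := by
  induction w with
  | nil => rfl
  | cons c t ih =>
      simp only [List.any_cons, ih]
      cases PySem.Chars.islower c <;> cases PySem.Chars.isupper c <;> simp

-- the flush condition of the state machine = A's keep-this-token condition
theorem pv_cond_eq (w : List Char) :
    (!(PySem.Chars.lower w).isEmpty
      && !((w.any (fun c => PySem.Chars.islower c || PySem.Chars.isupper c))
            && !(w.any PySem.Chars.islower)))
      = (!w.isEmpty && !(pvIsUpperTok w)) := by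
  rw [pv_any_or, pv_lower_eq, pvIsUpperTok]
  cases w.any PySem.Chars.islower <;> cases w.any PySem.Chars.isupper <;> simp

-- split₀.go with an accumulator = the accumulator (reversed) in front
theorem pv_go_acc (s cur : List Char) (accW : List (List Char)) :
    PySem.Chars.split₀.go s cur accW = accW.reverse ++ PySem.Chars.split₀.go s cur [] := by
  induction s generalizing cur accW with
  | nil => simp [PySem.Chars.split₀.go]; split_ifs <;> simp
  | cons c rest ih =>
      simp only [PySem.Chars.split₀.go]
      split_ifs with h1 h2
      · exact ih _ _
      · rw [ih [] (cur.reverse :: accW), ih [] [cur.reverse]]; simp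
      · exact ih _ _

-- the state machine, run from a state representing the raw token 'raw',
-- produces exactly the filterMap of the tokens split₀ would produce
theorem pv_lower_nil : PySem.Chars.lower [] = [] := rfl

theorem pv_machine (keep : Char → Bool)
    (hk : ∀ c, PySem.Chars.isspace c = true → keep c = true) :
    ∀ (s raw : List Char) (pieces : List (List Char)),
    ((s ++ [' ']).foldl (pvStep keep)
        (pieces, PySem.Chars.lower (raw.filter keep),
         (raw.filter keep).any PySem.Chars.islower,
         (raw.filter keep).any (fun c => PySem.Chars.islower c || PySem.Chars.isupper c))).1
      = pieces ++ (PySem.Chars.split₀.go s raw.reverse []).filterMap (pvEmit keep) := by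
  intro s
  induction s with
  | nil =>
      intro raw pieces
      have hsp : PySem.Chars.isspace ' ' = true := by decide
      simp only [List.nil_append, List.foldl_cons, List.foldl_nil, pvStep, hsp, if_pos,
        PySem.Chars.split₀.go]
      rw [pv_cond_eq]
      rcases eq_or_ne raw [] with h | h
      · simp [h, pvEmit]
      · have hne : raw.reverse.isEmpty = false := by
          simp [List.isEmpty_iff, h]
        cases hcond : (!(raw.filter keep).isEmpty && !(pvIsUpperTok (raw.filter keep))) with
        | false =>
            have he : pvEmit keep raw = none := by
              simp only [pvEmit, hcond, Bool.false_eq_true, if_false]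
            simp [hne, hcond, he]
        | true =>
            have he : pvEmit keep raw = some (PySem.Chars.lower (raw.filter keep)) := by
              simp only [pvEmit, hcond, if_true]
            simp [hne, hcond, he]
  | cons c rest ih =>
      intro raw pieces
      by_cases hs : PySem.Chars.isspace c = true
      · simp only [List.cons_append, List.foldl_cons, pvStep, hs, if_pos,
          PySem.Chars.split₀.go]
        rw [pv_cond_eq]
        have h0 := ih [] (if (!(raw.filter keep).isEmpty && !(pvIsUpperTok (raw.filter keep)))
            then pieces ++ [PySem.Chars.lower (raw.filter keep)] else pieces)
        simp only [List.filter_nil, pv_lower_nil, List.any_nil, List.reverse_nil] at h0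
        rw [h0]
        rcases eq_or_ne raw [] with h | h
        · have hw : (raw.filter keep).isEmpty = true := by simp [h]
          simp [h, hw]
        · have hne : raw.reverse.isEmpty = false := by simp [List.isEmpty_iff, h]
          simp only [hne, Bool.false_eq_true, if_false]
          rw [pv_go_acc rest [] [raw.reverse.reverse]]
          simp only [List.reverse_reverse, List.reverse_cons, List.reverse_nil,
            List.nil_append, List.filterMap_append, List.filterMap_cons,
            List.filterMap_nil]
          cases hcond : (!(raw.filter keep).isEmpty && !(pvIsUpperTok (raw.filter keep))) with
          | false =>
              have he : pvEmit keep raw = none := by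
                simp only [pvEmit, hcond, Bool.false_eq_true, if_false]
              simp [hcond, he]
          | true =>
              have he : pvEmit keep raw = some (PySem.Chars.lower (raw.filter keep)) := by
                simp only [pvEmit, hcond, if_true]
              simp [hcond, he]
      · simp only [List.cons_append, List.foldl_cons, pvStep, hs, Bool.false_eq_true,
          if_false, PySem.Chars.split₀.go]
        by_cases hkc : keep c = true
        · have h1 := ih (raw ++ [c]) pieces
          simp only [List.filter_append, List.filter_cons, hkc, if_pos, List.filter_nil,
            pv_lower_eq, List.map_append, List.map_cons, List.map_nil, List.any_append,
            List.any_cons, List.any_nil, Bool.or_false, List.reverse_append,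
            List.reverse_cons, List.reverse_nil, List.nil_append] at h1
          simp only [hkc, if_pos, pv_lower_eq]
          exact h1
        · have hkc' : keep c = false := by simpa using hkc
          have h1 := ih (raw ++ [c]) pieces
          simp only [List.filter_append, List.filter_cons, hkc', Bool.false_eq_true,
            if_false, List.filter_nil, List.append_nil, List.reverse_append,
            List.reverse_cons, List.reverse_nil, List.nil_append] at h1
          simp only [hkc', Bool.false_eq_true, if_false]
          exact h1

-- filterMap of pvEmit = A's filter/filter/map pipeline over the raw tokens
theorem pv_filterMap_eq (keep : Char → Bool) (L : List (List Char)) :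
    L.filterMap (pvEmit keep)
      = ((((L.map (·.filter keep)).filter (fun w => !w.isEmpty)).filter
            (fun w => !(pvIsUpperTok w))).map PySem.Chars.lower) := by
  induction L with
  | nil => rfl
  | cons t rest ih =>
      simp only [List.filterMap_cons, List.map_cons, List.filter_cons]
      cases hcond : (!(t.filter keep).isEmpty && !(pvIsUpperTok (t.filter keep))) with
      | false =>
          have he : pvEmit keep t = none := by
            simp only [pvEmit, hcond, Bool.false_eq_true, if_false]
          by_cases h1 : (t.filter keep).isEmpty = true
          · simp [he, h1, ih]
          · by_cases h2 : pvIsUpperTok (t.filter keep) = true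
            · simp [he, h1, h2, ih]
            · simp [h1, h2] at hcond
      | true =>
          have he : pvEmit keep t = some (PySem.Chars.lower (t.filter keep)) := by
            simp only [pvEmit, hcond, if_true]
          have hparts : (t.filter keep).isEmpty = false ∧ pvIsUpperTok (t.filter keep) = false := by
            simpa using hcond
          simp [he, hparts.1, hparts.2, ih]

-- deleting non-whitespace chars commutes with whitespace splitting:
-- the tokens of the filtered text are the filtered tokens, empties dropped
theorem pv_go_filter (p : Char → Bool) (hp : ∀ c, PySem.Chars.isspace c = true → p c = true)
    (s cur : List Char) :
    PySem.Chars.split₀.go (s.filter p) (cur.filter p) []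
      = ((PySem.Chars.split₀.go s cur []).map (·.filter p)).filter (fun w => !w.isEmpty) := by
  induction s generalizing cur with
  | nil =>
      simp only [List.filter_nil, PySem.Chars.split₀.go]
      rcases eq_or_ne cur [] with hc | hc
      · simp [hc]
      · rcases eq_or_ne (cur.filter p) [] with h | h
        · simp [h, hc, List.filter_reverse, List.isEmpty_iff]
        · simp [h, hc, List.filter_reverse, List.isEmpty_iff]
  | cons c rest ih =>
      by_cases hs : PySem.Chars.isspace c = true
      · have hpc := hp c hs
        simp only [List.filter_cons, hpc, if_pos]
        rw [PySem.Chars.split₀.go, PySem.Chars.split₀.go]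
        simp only [hs, if_pos]
        rcases eq_or_ne cur [] with hcur | hcur
        · have hfe : cur.filter p = [] := by simp [hcur]
          simp only [hcur, hfe, List.isEmpty_nil, if_pos]
          simpa using ih []
        · rcases eq_or_ne (cur.filter p) [] with hfe | hfe
          · simp only [List.isEmpty_iff, hfe, hcur, if_pos, if_neg hcur]
            rw [pv_go_acc rest [] [cur.reverse]]
            have h0 := ih []
            simp only [List.filter_nil] at h0
            simp [List.filter_reverse, hfe, h0]
          · simp only [List.isEmpty_iff, hfe, hcur, if_neg]
            rw [pv_go_acc (rest.filter p) [] [(cur.filter p).reverse],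
                pv_go_acc rest [] [cur.reverse]]
            have h0 := ih []
            simp only [List.filter_nil] at h0
            simp [List.filter_reverse, hfe, h0, List.isEmpty_iff, List.reverse_eq_nil_iff]
      · rw [PySem.Chars.split₀.go]
        simp only [hs, if_neg, Bool.not_eq_true]
        by_cases hpc : p c = true
        · simp only [List.filter_cons, hpc, if_pos]
          rw [PySem.Chars.split₀.go]
          simp only [hs]
          have := ih (c :: cur)
          simpa [List.filter_cons, hpc] using this
        · have hpc' : p c = false := by simpa using hpc
          simp only [List.filter_cons, hpc', Bool.false_eq_true, if_false]
          have := ih (c :: cur)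
          simp [List.filter_cons, hpc'] at this
          simpa [hs] using this

theorem pv_split₀_filter (p : Char → Bool) (hp : ∀ c, PySem.Chars.isspace c = true → p c = true)
    (s : List Char) :
    PySem.Chars.split₀ (s.filter p)
      = ((PySem.Chars.split₀ s).map (·.filter p)).filter (fun w => !w.isEmpty) := by
  unfold PySem.Chars.split₀
  simpa using pv_go_filter p hp s []

-- three successive char-deletion passes = one pass over the merged table
theorem pv_filter3 (l t1 t2 t3 : List Char) :
    ((l.filter (fun c => !(t1.contains c))).filter (fun c => !(t2.contains c))).filter
        (fun c => !(t3.contains c))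
      = l.filter (fun c => !((t1 ++ t2 ++ t3).contains c)) := by
  rw [List.filter_filter, List.filter_filter]
  apply List.filter_congr
  intro a _
  by_cases m1 : a ∈ t1 <;> by_cases m2 : a ∈ t2 <;> by_cases m3 : a ∈ t3 <;>
    simp [m1, m2, m3]

-- no whitespace char is in the removal set
theorem pv_removed_no_space (rp : Bool) (c : Char) (hs : PySem.Chars.isspace c = true) :
    (!(pvRemoved rp).contains c) = true := by
  have hall : (pvRemoved rp).all (fun c => !(PySem.Chars.isspace c)) = true := by
    cases rp <;> decide
  rw [List.all_eq_true] at hall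
  by_contra h
  simp at h
  have := hall c h
  simp [hs] at this

-- swap A's filter order (isupper-filter before empty-filter) into the canonical form
theorem pv_filter_swap (L : List (List Char)) :
    ((L.filter (fun w => !w.isEmpty)).filter (fun w => !(pvIsUpperTok w)))
      = ((L.filter (fun w => !(pvIsUpperTok w))).filter (fun w => !w.isEmpty)) := by
  rw [List.filter_filter, List.filter_filter]
  apply List.filter_congr
  intro a _
  exact Bool.and_comm _ _

-- ===== VERDICT (by name: the statement is the Claim_ definition above) =====
theorem clean_prose_text_spec : Claim_equal_clean_prose_text := by
  intro text rp _
  unfold Spec_clean_prose_text clean_prose_text clean_prose_text_alt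
  dsimp only
  set keep := fun c => !((pvRemoved rp).contains c) with hkeep
  have hk : ∀ c, PySem.Chars.isspace c = true → keep c = true := fun c hc =>
    pv_removed_no_space rp c hc
  -- B side: the state machine run from the empty state
  have hB := pv_machine keep hk text.toList [] []
  simp only [List.filter_nil, PySem.Chars.lower, List.map_nil, List.any_nil,
    List.reverse_nil, List.nil_append] at hB
  have hgo : PySem.Chars.split₀.go text.toList [] [] = PySem.Chars.split₀ text.toList := by
    rfl
  rw [hgo] at hB
  rw [hB]
  -- A side: merge the three deletion passes into one filter over pvRemoved
  have h3 : ∀ l : List Char,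
      (((if rp then l.filter (fun c => !("*,.:?![]';()~<>".toList.contains c))
          else l.filter (fun c => !("*[]()~<>".toList.contains c))).filter
            (fun c => !("\"".toList.contains c))).filter
            (fun c => !("0123456789".toList.contains c)))
        = l.filter keep := by
    intro l
    have hsplit : pvRemoved rp
        = (if rp then "*,.:?![]';()~<>" else "*[]()~<>").toList
          ++ "\"".toList ++ "0123456789".toList := by
      cases rp <;> rfl
    rw [hkeep, hsplit]
    cases rp <;> simp only [Bool.false_eq_true, if_false, if_true] <;>
      exact pv_filter3 l _ _ _
  simp only [h3, pv_split₀_filter keep hk, pv_filterMap_eq, pv_filter_swap]
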